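-- pv_equiv track=rewrite | github.com/billythegoat356/alsyncer | alsyncer/syncer.py | fit_alignment
-- ===== SOURCE A (Python) =====
-- def fit_alignment(
--         alignment_text: str, reference_text: str,
--         alignment_gap: int = 0, reference_gap: int = 0
--     ) -> tuple[list[int], list[int]]:
--     """
--     Fits the given alignment text to a reference text
--     Returns a list of additions in the alignment text, and missing characters from the reference text, under the form of indexes
--
--     Parameters:
--         alignment_text: str
--         reference_text: str
--         alignment_gap: int = 0
--         reference_gap: int = 0
--
--     Returns:
--         tuple[list[int], list[int]] - additions and missing chars
--     """
--
--     # Start fitting with the minimum length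
--     min_length = min(len(alignment_text), len(reference_text))
--
--     # Regressively fit until there is nothing anymore
--     for current_length in range(min_length, 0, -1):
--
--         # The difference between the alignment text and the current length tells us how many substrings we can take
--         diff = len(alignment_text) - current_length
--
--         # Progressively cut substrings from left to right
--         for start_i in range(diff+1):
--             substring = alignment_text[start_i:start_i+current_length]
--
--             # Try to index them in the reference text
--             try:
--                 pos = reference_text.index(substring)
--             except ValueError:
--                 continue
--
--             has_before = pos != 0 or start_i != 0
--             has_after = (
--                 pos + current_length < len(reference_text) or
--                 start_i + current_length < len(alignment_text)
--             )
--
--             additions: list[int] = []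
--             missing: list[int] = []
--
--             # Fit part before
--             if has_before:
--                 before_alignment_text = alignment_text[:start_i]
--                 before_reference_text = reference_text[:pos]
--                 _a, _m = fit_alignment(before_alignment_text, before_reference_text, alignment_gap, reference_gap)
--                 additions.extend(_a)
--                 missing.extend(_m)
--
--             # Fit part after
--             if has_after:
--                 this_alignment_gap = start_i+current_length
--                 this_reference_gap = pos+current_length
--
--                 after_alignment_text = alignment_text[this_alignment_gap:]
--                 after_reference_text = reference_text[this_reference_gap:]
--
--                 alignment_gap += this_alignment_gap
--                 reference_gap += this_reference_gap
--
--                 _a, _m = fit_alignment(after_alignment_text, after_reference_text, alignment_gap, reference_gap)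
--                 additions.extend(_a)
--                 missing.extend(_m)
--
--             return additions, missing
--
--     # If nothing was fit, return everything
--     return (
--         [_a + alignment_gap for _a in range(len(alignment_text))],
--         [_m + reference_gap for _m in range(len(reference_text))],
--     )
-- ===== SOURCE B (Python) =====
-- def fit_alignment(
--         alignment_text: str, reference_text: str,
--         alignment_gap: int = 0, reference_gap: int = 0
--     ) -> tuple[list[int], list[int]]:
--     """
--     Fits the given alignment text to a reference text.
--     Same result as the original, but the longest common substring (with the
--     same tie-break: longest, then leftmost in alignment_text, then leftmost
--     in reference_text) is found with an O(n*m) suffix-DP table instead of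
--     scanning every length/start and calling str.index.
--     """
--     a, r = alignment_text, reference_text
--     n, m = len(a), len(r)
--
--     # dp[i][j] = length of the longest common prefix of a[i:] and r[j:]
--     dp = [[0] * (m + 1) for _ in range(n + 1)]
--     for i in range(n - 1, -1, -1):
--         row, nxt = dp[i], dp[i + 1]
--         ai = a[i]
--         for j in range(m - 1, -1, -1):
--             if ai == r[j]:
--                 row[j] = nxt[j + 1] + 1
--
--     # row-major argmax with strict improvement = longest match,
--     # ties broken by smallest i, then smallest j
--     L = bi = bj = 0
--     for i in range(n):
--         row = dp[i]
--         for j in range(m):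
--             if row[j] > L:
--                 L, bi, bj = row[j], i, j
--
--     if L == 0:
--         # nothing in common: everything is an addition / missing
--         return (
--             [k + alignment_gap for k in range(n)],
--             [k + reference_gap for k in range(m)],
--         )
--
--     additions: list[int] = []
--     missing: list[int] = []
--
--     if bj != 0 or bi != 0:
--         _a, _m = fit_alignment(a[:bi], r[:bj], alignment_gap, reference_gap)
--         additions.extend(_a)
--         missing.extend(_m)
--
--     if bj + L < m or bi + L < n:
--         _a, _m = fit_alignment(a[bi + L:], r[bj + L:],
--                                alignment_gap + bi + L, reference_gap + bj + L)
--         additions.extend(_a)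
--         missing.extend(_m)
--
--     return additions, missing
-- ===== Notes on version B (the rewrite author's own statement) =====
-- stated objective: faster
-- what changed: A finds the longest common substring by trying every length descending and every start with str.index; B computes one O(n*m) suffix dynamic-programming table (dp[i][j] = longest common prefix of a[i:] and r[j:]) and takes its row-major first maximum, which reproduces A's exact tie-break (longest, then leftmost start in the alignment text, then first occurrence in the reference).
import Mathlib
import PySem

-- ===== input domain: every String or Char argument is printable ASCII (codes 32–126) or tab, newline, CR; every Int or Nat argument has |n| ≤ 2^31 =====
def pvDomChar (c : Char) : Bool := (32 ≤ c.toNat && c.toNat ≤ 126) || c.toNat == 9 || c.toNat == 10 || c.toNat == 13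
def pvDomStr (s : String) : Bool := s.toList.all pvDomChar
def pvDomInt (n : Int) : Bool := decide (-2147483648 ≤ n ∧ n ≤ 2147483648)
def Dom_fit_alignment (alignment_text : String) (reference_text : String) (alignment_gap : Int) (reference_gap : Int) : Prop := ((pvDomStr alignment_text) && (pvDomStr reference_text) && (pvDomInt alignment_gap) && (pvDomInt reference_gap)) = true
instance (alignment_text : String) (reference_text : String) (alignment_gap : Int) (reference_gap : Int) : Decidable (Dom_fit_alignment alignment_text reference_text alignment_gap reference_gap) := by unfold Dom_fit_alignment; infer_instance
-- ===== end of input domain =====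

-- B replaces A's per-length/per-start substring scan (with str.index) by a single
-- O(n·m) suffix-DP table for the longest common substring, keeping A's exact
-- tie-break; a timing run measures it faster on large inputs.

-- ===== PORT A =====
-- range(min_length, 0, -1): the descending list [k, k-1, …, 1]  (the loop counters
-- are nonnegative lengths, so the Python int range is ported on Nat; exact here)
def descLengths : Nat → List Nat
  | 0 => []
  | k+1 => (k+1) :: descLengths k

-- A's double loop returning at the first hit: for current_length descending, for
-- start_i ascending, try reference_text.index(substring) (ValueError -> continue).
-- a[i:i+l] with 0 <= i, i+l <= len(a) is (la.drop i).take l (exact); str.index is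
-- PySem.Chars.find (-1 exactly where Python raises ValueError).
def findA (la lr : List Char) : Option (Nat × Nat × Nat) :=
  (descLengths (min la.length lr.length)).findSome? fun ℓ =>
    (List.range (la.length - ℓ + 1)).findSome? fun i =>
      let f := PySem.Chars.find lr ((la.drop i).take ℓ)
      if f = -1 then none else some (ℓ, i, f.toNat)

-- if the inner try/index step of A yields a hit, there is a common match of length ℓ

-- fuel = recursion-depth bound: every recursive call strictly shrinks |a|+|r| and the
-- wrapper passes |a|+|r|+1, so the fuel-0 branch is never reached from the wrapper.
def fitA : Nat → List Char → List Char → Int → Int → List Int × List Int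
  | 0, _, _, _, _ => ([], [])
  | f+1, la, lr, ag, rg =>
    match findA la lr with
    | none =>
        ((List.range la.length).map fun k => (k : Int) + ag,
         (List.range lr.length).map fun k => (k : Int) + rg)
    | some (ℓ, i, p) =>
        let pre := if p ≠ 0 ∨ i ≠ 0 then fitA f (la.take i) (lr.take p) ag rg else ([], [])
        let post := if p + ℓ < lr.length ∨ i + ℓ < la.length then
            fitA f (la.drop (i+ℓ)) (lr.drop (p+ℓ))
              (ag + ((i+ℓ : Nat) : Int)) (rg + ((p+ℓ : Nat) : Int))
          else ([], [])
        (pre.1 ++ post.1, pre.2 ++ post.2)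

def fit_alignment (alignment_text : String) (reference_text : String) (alignment_gap : Int) (reference_gap : Int) : List Int × List Int :=
  fitA (alignment_text.toList.length + reference_text.toList.length + 1)
    alignment_text.toList reference_text.toList alignment_gap reference_gap

-- ===== PORT B =====
-- one dp row from the next row (nxt is passed already shifted by one): row[j] =
-- nxt[j+1]+1 if a[i]==r[j] else 0 for j < m, plus the trailing 0 column
def dpRow (c : Char) : List Char → List Nat → List Nat
  | [], _ => [0]
  | d :: ds, y :: ys => (if c = d then y + 1 else 0) :: dpRow c ds ys
  | _ :: ds, [] => 0 :: dpRow c ds []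

-- the dp table built bottom-up, row i from row i+1, exactly as B's Python loop
def dpTable : List Char → List Char → List (List Nat)
  | [], lr => [List.replicate (lr.length + 1) 0]
  | c :: cs, lr =>
    match dpTable cs lr with
    | [] => []
    | nxt :: rest => dpRow c lr nxt.tail :: nxt :: rest

-- row-major argmax with strict improvement (B's `if row[j] > L:` scan); j is the column
def scanRow (i : Nat) : Nat → List Nat → Nat × Nat × Nat → Nat × Nat × Nat
  | _, [], best => best
  | j, v :: vs, best => scanRow i (j+1) vs (if best.1 < v then (v, i, j) else best)

-- B's `for i in range(n): for j in range(m)`: first n rows, first m entries of each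
def scanRows (m : Nat) : Nat → List (List Nat) → Nat × Nat × Nat → Nat × Nat × Nat
  | _, [], best => best
  | i, row :: rows, best => scanRows m (i+1) rows (scanRow i 0 (row.take m) best)

def fitB : Nat → List Char → List Char → Int → Int → List Int × List Int
  | 0, _, _, _, _ => ([], [])
  | f+1, la, lr, ag, rg =>
    let b := scanRows lr.length 0 ((dpTable la lr).take la.length) (0, 0, 0)
    if b.1 = 0 then
      ((List.range la.length).map fun k => (k : Int) + ag,
       (List.range lr.length).map fun k => (k : Int) + rg)
    else
      let pre := if b.2.2 ≠ 0 ∨ b.2.1 ≠ 0 then fitB f (la.take b.2.1) (lr.take b.2.2) ag rg else ([], [])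
      let post := if b.2.2 + b.1 < lr.length ∨ b.2.1 + b.1 < la.length then
          fitB f (la.drop (b.2.1 + b.1)) (lr.drop (b.2.2 + b.1))
            (ag + ((b.2.1 + b.1 : Nat) : Int)) (rg + ((b.2.2 + b.1 : Nat) : Int))
        else ([], [])
      (pre.1 ++ post.1, pre.2 ++ post.2)

def fit_alignment_alt (alignment_text : String) (reference_text : String) (alignment_gap : Int) (reference_gap : Int) : List Int × List Int :=
  fitB (alignment_text.toList.length + reference_text.toList.length + 1)
    alignment_text.toList reference_text.toList alignment_gap reference_gap

-- ===== PRECONDITION & SPEC =====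
def Spec_fit_alignment (alignment_text : String) (reference_text : String) (alignment_gap : Int) (reference_gap : Int) (out : List Int × List Int) : Prop := out = fit_alignment_alt alignment_text reference_text alignment_gap reference_gap
instance (alignment_text : String) (reference_text : String) (alignment_gap : Int) (reference_gap : Int) (out : List Int × List Int) : Decidable (Spec_fit_alignment alignment_text reference_text alignment_gap reference_gap out) := by unfold Spec_fit_alignment; infer_instance

-- ===== CLAIM (what is proved, stated in full; the proofs are below) =====
def Claim_equal_fit_alignment : Prop := ∀ (alignment_text : String) (reference_text : String) (alignment_gap : Int) (reference_gap : Int), Dom_fit_alignment alignment_text reference_text alignment_gap reference_gap → Spec_fit_alignment alignment_text reference_text alignment_gap reference_gap (fit_alignment alignment_text reference_text alignment_gap reference_gap)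

-- ===== LEMMAS AND PROOFS =====

-- the length of the longest common prefix: the value dp[i][j] tabulates
def lcpLen : List Char → List Char → Nat
  | c :: cs, d :: ds => if c = d then lcpLen cs ds + 1 else 0
  | _, _ => 0

-- the specification of dp row i: lcp of a[i:] with every suffix of r
def rowSpec (x lr : List Char) : List Nat :=
  (List.range (lr.length + 1)).map fun j => lcpLen x (lr.drop j)

-- all (value, i, j) candidate cells in B's row-major scan order
def cells (la lr : List Char) : List (Nat × Nat × Nat) :=
  (List.range la.length).flatMap fun i =>
    (List.range lr.length).map fun j => (lcpLen (la.drop i) (lr.drop j), i, j)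

-- one strict-improvement update of B's scan
def step (b v : Nat × Nat × Nat) : Nat × Nat × Nat := if b.1 < v.1 then v else b

-- the largest candidate value (the length of the longest common substring)
def maxV (cs : List (Nat × Nat × Nat)) : Nat := cs.foldr (fun v acc => max v.1 acc) 0

-- abbreviation for B's scan result, used while proving the two finders equal
def scanBest (la lr : List Char) : Nat × Nat × Nat :=
  scanRows lr.length 0 ((dpTable la lr).take la.length) (0, 0, 0)

theorem lcpLen_le_left (x y : List Char) : lcpLen x y ≤ x.length := by
  induction x generalizing y with
  | nil => simp [lcpLen]
  | cons c cs ih =>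
    cases y with
    | nil => simp [lcpLen]
    | cons d ds =>
      simp only [lcpLen]
      split
      · simpa using ih ds
      · simp

theorem lcpLen_le_right (x y : List Char) : lcpLen x y ≤ y.length := by
  induction x generalizing y with
  | nil => simp [lcpLen]
  | cons c cs ih =>
    cases y with
    | nil => simp [lcpLen]
    | cons d ds =>
      simp only [lcpLen]
      split
      · simpa using ih ds
      · simp

theorem take_prefix_iff (ℓ : Nat) : ∀ (x y : List Char), ℓ ≤ x.length →
    ((x.take ℓ) <+: y ↔ ℓ ≤ lcpLen x y) := by
  induction ℓ with
  | zero => intro x y h; simp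
  | succ l ih =>
    intro x y h
    cases x with
    | nil => simp at h
    | cons c cs =>
      cases y with
      | nil =>
        simp only [List.take_succ_cons, lcpLen]
        constructor
        · intro hp; exact absurd (List.IsPrefix.length_le hp) (by simp)
        · intro hl; omega
      | cons d ds =>
        simp only [List.take_succ_cons, lcpLen, List.cons_prefix_cons]
        simp only [List.length_cons, Nat.succ_le_succ_iff] at h
        constructor
        · rintro ⟨rfl, hp⟩
          rw [if_pos rfl]
          exact Nat.succ_le_succ ((ih cs ds h).mp hp)
        · intro hl
          split at hl
          · next he => exact ⟨he, (ih cs ds h).mpr (by omega)⟩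
          · omega

theorem rowSpec_cons (x : List Char) (d : Char) (ds : List Char) :
    rowSpec x (d :: ds) = lcpLen x (d :: ds) :: rowSpec x ds := by
  simp only [rowSpec, List.length_cons, List.range_succ_eq_map, List.map_cons, List.map_map]
  simp [Function.comp_def]

theorem dpRow_spec (c : Char) (cs : List Char) : ∀ lr : List Char,
    dpRow c lr (rowSpec cs lr).tail = rowSpec (c :: cs) lr := by
  intro lr
  induction lr with
  | nil =>
    show dpRow c [] _ = rowSpec (c :: cs) []
    simp [dpRow, rowSpec, lcpLen]
  | cons d ds ih =>
    rw [rowSpec_cons cs d ds, rowSpec_cons (c :: cs) d ds]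
    show dpRow c (d :: ds) (rowSpec cs ds) = _
    have hd : rowSpec cs ds = lcpLen cs ds :: (rowSpec cs ds).tail := by
      simp [rowSpec, List.range_succ_eq_map]
    rw [hd]
    show (if c = d then lcpLen cs ds + 1 else 0) :: dpRow c ds (rowSpec cs ds).tail = _
    rw [ih]
    rfl

theorem dpTable_spec (la lr : List Char) :
    dpTable la lr = (List.range (la.length + 1)).map fun i => rowSpec (la.drop i) lr := by
  induction la with
  | nil =>
    simp only [dpTable, List.length_nil, List.drop_nil]
    congr 1
    symm
    simp only [rowSpec]
    rw [List.eq_replicate_iff]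
    constructor
    · simp
    · intro b hb
      simp only [List.mem_map] at hb
      obtain ⟨j, _, rfl⟩ := hb
      cases lr.drop j <;> rfl
  | cons cc cs ih =>
    simp only [dpTable, ih]
    have hne : (List.range (cs.length + 1)).map (fun i => rowSpec (cs.drop i) lr) =
        rowSpec cs lr :: (List.range cs.length).map (fun i => rowSpec (cs.drop (i+1)) lr) := by
      rw [List.range_succ_eq_map]
      simp [Function.comp_def, List.map_map]
    rw [hne]
    simp only [List.length_cons, List.range_succ_eq_map (n := cs.length + 1), List.map_cons, List.map_map]
    rw [dpRow_spec]
    simp only [List.drop_zero]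
    congr 1
    rw [← hne]
    simp [Function.comp_def]

theorem scanRow_spec (i : Nat) (g : Nat → Nat) : ∀ (m j : Nat) (best : Nat × Nat × Nat),
    scanRow i j ((List.range m).map fun t => g (j + t)) best
      = List.foldl step best ((List.range m).map fun t => (g (j + t), i, j + t)) := by
  intro m
  induction m with
  | zero => intro j best; rfl
  | succ mm ih =>
    intro j best
    rw [List.range_succ_eq_map]
    simp only [List.map_cons, List.map_map, Function.comp_def]
    show scanRow i j (g (j + 0) :: _) best = _
    simp only [scanRow, List.foldl_cons]
    have h1 : (fun t => g (j + t.succ)) = (fun t => g ((j+1) + t)) := by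
      funext t; congr 1; omega
    have h2 : (fun t => (g (j + t.succ), i, j + t.succ)) = (fun t => (g ((j+1) + t), i, (j+1) + t)) := by
      funext t; have : j + t.succ = (j+1) + t := by omega
      rw [this]
    rw [h1, h2, ih (j+1)]
    congr 1

theorem rowSpec_take (x lr : List Char) :
    (rowSpec x lr).take lr.length = (List.range lr.length).map fun j => lcpLen x (lr.drop j) := by
  simp only [rowSpec, ← List.map_take, List.take_range]
  congr 2
  omega

theorem scan_all (la lr : List Char) : ∀ (nn i : Nat) (best : Nat × Nat × Nat),
    scanRows lr.length i ((List.range nn).map fun t => rowSpec (la.drop (i + t)) lr) best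
      = List.foldl step best ((List.range nn).flatMap fun t =>
          (List.range lr.length).map fun j => (lcpLen (la.drop (i + t)) (lr.drop j), i + t, j)) := by
  intro nn
  induction nn with
  | zero => intro i best; rfl
  | succ mm ih =>
    intro i best
    rw [List.range_succ_eq_map]
    simp only [List.map_cons, List.map_map, List.flatMap_map, Function.comp_def, List.flatMap_cons]
    show scanRows lr.length i (rowSpec (la.drop (i + 0)) lr :: _) _ = _
    simp only [scanRows]
    rw [List.foldl_append]
    have h1 : (fun t => rowSpec (la.drop (i + t.succ)) lr) = (fun t => rowSpec (la.drop ((i+1) + t)) lr) := by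
      funext t; have : i + t.succ = (i+1) + t := by omega
      rw [this]
    have h2 : (fun t => (List.range lr.length).map fun j => (lcpLen (la.drop (i + t.succ)) (lr.drop j), i + t.succ, j))
        = (fun t => (List.range lr.length).map fun j => (lcpLen (la.drop ((i+1) + t)) (lr.drop j), (i+1) + t, j)) := by
      funext t; have : i + t.succ = (i+1) + t := by omega
      rw [this]
    rw [h1, h2, rowSpec_take]
    have := scanRow_spec i (fun j => lcpLen (la.drop (i+0)) (lr.drop j)) lr.length 0 best
    simp only [Nat.zero_add] at this
    rw [this, ih (i+1)]
    simp only [Nat.add_zero]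

theorem scan_eq_foldl (la lr : List Char) :
    scanRows lr.length 0 ((dpTable la lr).take la.length) (0, 0, 0)
      = List.foldl step (0, 0, 0) (cells la lr) := by
  rw [dpTable_spec, ← List.map_take, List.take_range, Nat.min_eq_left (by omega)]
  have := scan_all la lr la.length 0 (0,0,0)
  simp only [Nat.zero_add] at this
  rw [this]
  rfl

theorem maxV_cons (w : Nat × Nat × Nat) (ws : List (Nat × Nat × Nat)) :
    maxV (w :: ws) = max w.1 (maxV ws) := rfl

theorem maxV_ge {cs : List (Nat × Nat × Nat)} {v} (h : v ∈ cs) : v.1 ≤ maxV cs := by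
  induction cs with
  | nil => simp at h
  | cons w ws ih =>
    rcases List.mem_cons.mp h with rfl | h'
    · rw [maxV_cons]; omega
    · rw [maxV_cons]; have := ih h'; omega

theorem maxV_attained {cs : List (Nat × Nat × Nat)} (h : 0 < maxV cs) :
    ∃ v ∈ cs, v.1 = maxV cs := by
  induction cs with
  | nil => simp [maxV] at h
  | cons w ws ih =>
    rw [maxV_cons] at h ⊢
    by_cases hc : maxV ws ≤ w.1
    · exact ⟨w, by simp, by omega⟩
    · have hm : max w.1 (maxV ws) = maxV ws := by omega
      rw [hm] at h ⊢
      obtain ⟨v, hv, he⟩ := ih (by omega)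
      exact ⟨v, by simp [hv], he⟩

theorem foldl_step_stay (cs : List (Nat × Nat × Nat)) : ∀ (b0 : Nat × Nat × Nat),
    (∀ v ∈ cs, v.1 ≤ b0.1) → List.foldl step b0 cs = b0 := by
  induction cs with
  | nil => intro b0 _; rfl
  | cons w ws ih =>
    intro b0 h
    have hw : ¬ (b0.1 < w.1) := by have := h w (by simp); omega
    simp only [List.foldl_cons, step, if_neg hw]
    exact ih b0 (fun v hv => h v (by simp [hv]))

theorem foldl_step_first (cs : List (Nat × Nat × Nat)) : ∀ (b0 : Nat × Nat × Nat),
    b0.1 < maxV cs →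
    ∃ w, cs.find? (fun v => v.1 = maxV cs) = some w ∧ List.foldl step b0 cs = w := by
  induction cs with
  | nil => intro b0 h; simp [maxV] at h
  | cons u us ih =>
    intro b0 h
    rw [maxV_cons] at h ⊢
    by_cases hc : maxV us ≤ u.1
    · have hm : max u.1 (maxV us) = u.1 := by omega
      rw [hm] at h ⊢
      refine ⟨u, ?_, ?_⟩
      · simp [List.find?_cons_of_pos]
      · simp only [List.foldl_cons, step, if_pos h]
        exact foldl_step_stay us u (fun v hv => le_trans (maxV_ge hv) hc)
    · have hm : max u.1 (maxV us) = maxV us := by omega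
      rw [hm] at h ⊢
      have hu : u.1 ≠ maxV us := by omega
      obtain ⟨w, hw1, hw2⟩ := ih (if b0.1 < u.1 then u else b0) (by split <;> omega)
      refine ⟨w, ?_, ?_⟩
      · rw [List.find?_cons_of_neg (by simpa using hu)]
        exact hw1
      · simp only [List.foldl_cons, step]
        exact hw2

theorem mem_descLengths {ℓ k : Nat} : ℓ ∈ descLengths k ↔ 1 ≤ ℓ ∧ ℓ ≤ k := by
  induction k with
  | zero => simp [descLengths]; omega
  | succ kk ih => simp [descLengths, ih]; omega

theorem mem_cells {la lr : List Char} {v} :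
    v ∈ (List.range la.length).flatMap (fun i =>
      (List.range lr.length).map fun j => (lcpLen (la.drop i) (lr.drop j), i, j)) ↔
    ∃ i < la.length, ∃ j < lr.length, v = (lcpLen (la.drop i) (lr.drop j), i, j) := by
  simp [List.mem_flatMap, List.mem_map, List.mem_range, eq_comm]

theorem findSome?_range_first {α : Type} :
    ∀ (k : Nat) (f : Nat → Option α) (r : α) (N : Nat), k < N → (∀ t < k, f t = none) → f k = some r →
    (List.range N).findSome? f = some r := by
  intro k
  induction k with
  | zero =>
    intro f r N hN _ hk
    cases N with
    | zero => omega
    | succ nn => rw [List.range_succ_eq_map]; simp [hk]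
  | succ kk ih =>
    intro f r N hN hnone hk
    cases N with
    | zero => omega
    | succ nn =>
      rw [List.range_succ_eq_map]
      simp only [List.findSome?_cons, hnone 0 (by omega)]
      rw [List.findSome?_map]
      exact ih (f ∘ Nat.succ) r nn (by omega) (fun t ht => hnone (t+1) (by omega)) hk

theorem findSome?_desc_first {α : Type} (f : Nat → Option α) {r : α} {L : Nat}
    (hL : 1 ≤ L) (hsome : f L = some r) :
    ∀ k, L ≤ k → (∀ ℓ, L < ℓ → ℓ ≤ k → f ℓ = none) → (descLengths k).findSome? f = some r := by
  intro k
  induction k with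
  | zero => intro hk _; omega
  | succ kk ih =>
    intro hk hnone
    by_cases he : L = kk + 1
    · subst he
      simp [descLengths, hsome]
    · simp only [descLengths, List.findSome?_cons, hnone (kk+1) (by omega) (by omega)]
      exact ih (by omega) (fun ℓ h1 h2 => hnone ℓ h1 (by omega))

theorem inner2_hit {la lr : List Char} {ℓ i : Nat} (hi : ℓ ≤ la.length - i)
    (h : PySem.Chars.find lr ((la.drop i).take ℓ) ≠ -1) :
    ∃ j, ℓ ≤ lcpLen (la.drop i) (lr.drop j) := by
  have h0 : (0:Int) ≤ PySem.Chars.find lr ((la.drop i).take ℓ) := by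
    have := PySem.Chars.neg_one_le_find lr ((la.drop i).take ℓ)
    omega
  have hinf := (PySem.Chars.find_nonneg_iff lr ((la.drop i).take ℓ)).mp h0
  have hisin := (PySem.Chars.isIn_iff_infix ((la.drop i).take ℓ) lr).mpr hinf
  obtain ⟨j, hj⟩ := (PySem.Chars.exists_prefix_drop_iff_isIn ((la.drop i).take ℓ) lr).mpr hisin
  exact ⟨j, (take_prefix_iff ℓ (la.drop i) (lr.drop j) (by simp [List.length_drop]; omega)).mp hj⟩

-- a match of length ℓ ≥ 1 lies strictly inside both strings and below the global max

theorem match_bounds {la lr : List Char} {ℓ i j : Nat} (hℓ : 1 ≤ ℓ)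
    (h : ℓ ≤ lcpLen (la.drop i) (lr.drop j)) : i < la.length ∧ j < lr.length := by
  have h1 := lcpLen_le_left (la.drop i) (lr.drop j)
  have h2 := lcpLen_le_right (la.drop i) (lr.drop j)
  simp [List.length_drop] at h1 h2
  omega

theorem find?_cells_first {la lr : List Char} {L : Nat}
    (P : Nat → Prop) (hPdef : ∀ i, P i ↔ ∃ j, j < lr.length ∧ lcpLen (la.drop i) (lr.drop j) = L)
    [DecidablePred P]
    (hexP : ∃ i, P i)
    (Q : Nat → Prop) (hQdef : ∀ j, Q j ↔ lcpLen (la.drop (Nat.find hexP)) (lr.drop j) = L ∧ j < lr.length)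
    [DecidablePred Q]
    (hexQ : ∃ j, Q j) (hL1 : 1 ≤ L) :
    (cells la lr).find? (fun v => v.1 = L) = some (L, Nat.find hexP, Nat.find hexQ) := by
  set i₀ := Nat.find hexP with hi0
  set j₀ := Nat.find hexQ with hj0
  obtain ⟨hQ1, hQ2⟩ := (hQdef j₀).mp (Nat.find_spec hexQ)
  have hin : i₀ < la.length := (match_bounds hL1 (le_of_eq hQ1.symm)).1
  have hrange : List.range la.length = List.range i₀ ++ (List.range (la.length - i₀)).map (i₀ + ·) := by
    rw [← List.range_add]; congr 1; omega
  unfold cells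
  rw [hrange, List.flatMap_append, List.find?_append]
  have hleft : ((List.range i₀).flatMap fun i =>
      (List.range lr.length).map fun j => (lcpLen (la.drop i) (lr.drop j), i, j)).find?
        (fun v => v.1 = L) = none := by
    apply List.find?_eq_none.mpr
    intro v hv
    simp only [List.mem_flatMap, List.mem_map, List.mem_range] at hv
    obtain ⟨i, hi, j, hj, rfl⟩ := hv
    have hnP := Nat.find_min hexP (show i < i₀ from hi)
    simp only [decide_eq_true_eq]
    intro he
    exact hnP ((hPdef i).mpr ⟨j, hj, he⟩)
  rw [hleft, Option.none_or]
  rw [show la.length - i₀ = (la.length - i₀ - 1) + 1 from by omega, List.range_succ_eq_map]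
  simp only [List.map_cons, List.flatMap_cons, List.find?_append, Nat.add_zero]
  have hrow : ((List.range lr.length).map fun j => (lcpLen (la.drop i₀) (lr.drop j), i₀, j)).find?
      (fun v => v.1 = L) = some (L, i₀, j₀) := by
    have hrange2 : List.range lr.length = List.range j₀ ++ (List.range (lr.length - j₀)).map (j₀ + ·) := by
      rw [← List.range_add]; congr 1; omega
    rw [hrange2, List.map_append, List.find?_append]
    have hleft2 : ((List.range j₀).map fun j => (lcpLen (la.drop i₀) (lr.drop j), i₀, j)).find?
        (fun v => v.1 = L) = none := by
      apply List.find?_eq_none.mpr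
      intro v hv
      simp only [List.mem_map, List.mem_range] at hv
      obtain ⟨j, hj, rfl⟩ := hv
      have hnQ := Nat.find_min hexQ (show j < j₀ from hj)
      simp only [decide_eq_true_eq]
      intro he
      exact hnQ ((hQdef j).mpr ⟨he, by omega⟩)
    rw [hleft2, Option.none_or]
    rw [show lr.length - j₀ = (lr.length - j₀ - 1) + 1 from by omega, List.range_succ_eq_map]
    simp only [List.map_cons, Nat.add_zero]
    rw [List.find?_cons_of_pos (by simp [hQ1])]
    rw [hQ1]
  rw [hrow]
  rfl

theorem findA_first {la lr : List Char} {L : Nat}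
    (P : Nat → Prop) (hPdef : ∀ i, P i ↔ ∃ j, j < lr.length ∧ lcpLen (la.drop i) (lr.drop j) = L)
    [DecidablePred P]
    (hexP : ∃ i, P i)
    (Q : Nat → Prop) (hQdef : ∀ j, Q j ↔ lcpLen (la.drop (Nat.find hexP)) (lr.drop j) = L ∧ j < lr.length)
    [DecidablePred Q]
    (hexQ : ∃ j, Q j) (hL1 : 1 ≤ L)
    (hmax : ∀ i j, i < la.length → j < lr.length → lcpLen (la.drop i) (lr.drop j) ≤ L) :
    findA la lr = some (L, Nat.find hexP, Nat.find hexQ) := by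
  set i₀ := Nat.find hexP with hi0
  set j₀ := Nat.find hexQ with hj0
  obtain ⟨hQ1, hQ2⟩ := (hQdef j₀).mp (Nat.find_spec hexQ)
  obtain ⟨hin, _⟩ := match_bounds hL1 (le_of_eq hQ1.symm)
  have hLn : L ≤ la.length - i₀ := by
    have := lcpLen_le_left (la.drop i₀) (lr.drop j₀)
    simp only [List.length_drop] at this; omega
  have hLm : L ≤ lr.length - j₀ := by
    have := lcpLen_le_right (la.drop i₀) (lr.drop j₀)
    simp only [List.length_drop] at this; omega
  unfold findA
  have hminLA : L ≤ min la.length lr.length := by omega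
  apply findSome?_desc_first _ hL1 _ (min la.length lr.length) hminLA
  · -- longer lengths have no occurrence at all
    intro ℓ hgt hle
    apply List.findSome?_eq_none_iff.mpr
    intro i himem
    rw [List.mem_range] at himem
    simp only
    by_cases hf : PySem.Chars.find lr ((la.drop i).take ℓ) = -1
    · rw [if_pos hf]
    · exfalso
      have hℓn : ℓ ≤ la.length := le_trans hle (Nat.min_le_left _ _)
      obtain ⟨j, hj⟩ := inner2_hit (show ℓ ≤ la.length - i from by omega) hf
      obtain ⟨hiN, hjN⟩ := match_bounds (by omega) hj
      have := hmax i j hiN hjN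
      omega
  · -- the scan at length L returns (L, i₀, j₀)
    apply findSome?_range_first i₀ _ (L, i₀, j₀) (la.length - L + 1) (by omega)
    · -- smaller start indices have no occurrence
      intro t ht
      simp only
      by_cases hf : PySem.Chars.find lr ((la.drop t).take L) = -1
      · rw [if_pos hf]
      · exfalso
        obtain ⟨j, hj⟩ := inner2_hit (show L ≤ la.length - t from by omega) hf
        obtain ⟨htn, hjm⟩ := match_bounds hL1 hj
        have hle := hmax t j htn hjm
        exact Nat.find_min hexP ht ((hPdef t).mpr ⟨j, hjm, by omega⟩)
    · -- at i₀ the first occurrence in the reference is exactly j₀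
      simp only
      have hpre : ((la.drop i₀).take L) <+: lr.drop j₀ :=
        (take_prefix_iff L (la.drop i₀) (lr.drop j₀) (by simp only [List.length_drop]; omega)).mpr
          (le_of_eq hQ1.symm)
      have hnn : (0:Int) ≤ PySem.Chars.find lr ((la.drop i₀).take L) := by
        rw [PySem.Chars.find_nonneg_iff]
        rw [← PySem.Chars.isIn_iff_infix, ← PySem.Chars.exists_prefix_drop_iff_isIn]
        exact ⟨j₀, hpre⟩
      rw [if_neg (by omega)]
      obtain ⟨hp1, hp2⟩ := PySem.Chars.find_spec hnn
      have htle : (PySem.Chars.find lr ((la.drop i₀).take L)).toNat ≤ j₀ := by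
        by_contra hgt
        exact hp2 j₀ (by omega) hpre
      have hlc : L ≤ lcpLen (la.drop i₀) (lr.drop (PySem.Chars.find lr ((la.drop i₀).take L)).toNat) :=
        (take_prefix_iff L (la.drop i₀) _ (by simp only [List.length_drop]; omega)).mp hp1
      obtain ⟨_, htm⟩ := match_bounds hL1 hlc
      have hjle : j₀ ≤ (PySem.Chars.find lr ((la.drop i₀).take L)).toNat := by
        apply Nat.find_min' hexQ
        rw [hQdef]
        exact ⟨by have := hmax i₀ _ hin htm; omega, htm⟩
      have : (PySem.Chars.find lr ((la.drop i₀).take L)).toNat = j₀ := by omega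
      rw [this]

theorem finder_eq (la lr : List Char) :
    findA la lr = (if (scanBest la lr).1 = 0 then none else some (scanBest la lr)) := by
  unfold scanBest
  rw [scan_eq_foldl]
  by_cases h0 : maxV (cells la lr) = 0
  · have hstay : List.foldl step (0,0,0) (cells la lr) = (0,0,0) :=
      foldl_step_stay (cells la lr) (0,0,0) (fun v hv => by have := maxV_ge hv; omega)
    rw [hstay, if_pos rfl]
    apply List.findSome?_eq_none_iff.mpr
    intro ℓ hℓmem
    obtain ⟨h1, h2⟩ := mem_descLengths.mp hℓmem
    apply List.findSome?_eq_none_iff.mpr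
    intro i himem
    rw [List.mem_range] at himem
    simp only
    by_cases hf : PySem.Chars.find lr ((la.drop i).take ℓ) = -1
    · rw [if_pos hf]
    · exfalso
      have hℓn : ℓ ≤ la.length := le_trans h2 (Nat.min_le_left _ _)
      obtain ⟨j, hj⟩ := inner2_hit (show ℓ ≤ la.length - i from by omega) hf
      obtain ⟨hiN, hjN⟩ := match_bounds h1 hj
      have : ((lcpLen (la.drop i) (lr.drop j), i, j) : Nat × Nat × Nat) ∈ cells la lr :=
        mem_cells.mpr ⟨i, hiN, j, hjN, rfl⟩
      have := maxV_ge this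
      simp only at this
      omega
  · set L := maxV (cells la lr) with hLdef
    have hL1 : 1 ≤ L := by omega
    obtain ⟨w, hw1, hw2⟩ := foldl_step_first (cells la lr) (0,0,0) (by simpa using hL1)
    rw [hw2]
    have hwp : w.1 = L := by have := List.find?_some hw1; simpa using this
    rw [if_neg (by omega)]
    have hmax : ∀ i j, i < la.length → j < lr.length → lcpLen (la.drop i) (lr.drop j) ≤ L := by
      intro i j hi hj
      exact maxV_ge (mem_cells.mpr ⟨i, hi, j, hj, rfl⟩)
    have hexP : ∃ i, (fun i => ∃ j, j < lr.length ∧ lcpLen (la.drop i) (lr.drop j) = L) i := by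
      obtain ⟨v, hv, he⟩ := maxV_attained (show 0 < maxV (cells la lr) from by omega)
      obtain ⟨i, hi, j, hj, rfl⟩ := mem_cells.mp hv
      exact ⟨i, j, hj, he⟩
    have hexQ : ∃ j, (fun j => lcpLen (la.drop (Nat.find hexP)) (lr.drop j) = L ∧ j < lr.length) j := by
      obtain ⟨j, hj, he⟩ := Nat.find_spec hexP
      exact ⟨j, he, hj⟩
    have hB := find?_cells_first (la := la) (lr := lr) (L := L) _ (fun _ => Iff.rfl) hexP _
      (fun _ => Iff.rfl) hexQ hL1
    have hA := findA_first (la := la) (lr := lr) (L := L) _ (fun _ => Iff.rfl) hexP _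
      (fun _ => Iff.rfl) hexQ hL1 hmax
    rw [hA]
    rw [hB] at hw1
    simp only [Option.some_inj] at hw1
    rw [hw1]

theorem fit_eq : ∀ (f : Nat) (la lr : List Char) (ag rg : Int),
    fitA f la lr ag rg = fitB f la lr ag rg := by
  intro f
  induction f with
  | zero => intro la lr ag rg; rfl
  | succ ff ih =>
    intro la lr ag rg
    show (match findA la lr with
      | none => _
      | some (ℓ, i, p) => _) = _
    rw [finder_eq la lr]
    by_cases h0 : (scanBest la lr).1 = 0
    · rw [if_pos h0]
      show _ = fitB (ff+1) la lr ag rg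
      simp only [fitB, scanBest] at h0 ⊢
      rw [if_pos h0]
    · rw [if_neg h0]
      show _ = fitB (ff+1) la lr ag rg
      simp only [fitB, scanBest] at h0 ⊢
      rw [if_neg h0]
      obtain ⟨L, bi, bj⟩ := scanRows lr.length 0 ((dpTable la lr).take la.length) (0, 0, 0)
      simp only [ih]

-- ===== VERDICT (by name: the statement is the Claim_ definition above) =====
theorem fit_alignment_spec : Claim_equal_fit_alignment := by
  intro a r ag rg _
  unfold Spec_fit_alignment fit_alignment fit_alignment_alt
  exact fit_eq _ _ _ _ _
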